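-- pv_equiv track=rewrite | github.com/hannakebedom/legendary-palm-tree | punctuation.py | count_ellipses
-- ===== SOURCE A (Python) =====
-- def count_ellipses(text):
--     ellipses = 0
--     count = 0
--     for i in text:
--         if i == '.':
--             count += 1
--         if i == ' ':
--             continue
--         if count >= 3:
--             count = 0
--             ellipses += 1
--         if i in 'abcdefghijklmnopqrstuvwxyzABDCEFGHIJKLMNOPQRSTUVWXYZ':
--             count = 0
--             continue
--         if i in '123456789':
--             count = 0
--             continue
--         if i in '''?!,;:'-[]}{()"*/''':
--             count = 0
--             continue
--     return ellipses
-- ===== SOURCE B (Python) =====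
-- BREAKERS = ("abcdefghijklmnopqrstuvwxyzABDCEFGHIJKLMNOPQRSTUVWXYZ"
--             "123456789"
--             '''?!,;:'-[]}{()"*/''')
--
-- def count_ellipses(text):
--     # Stage 1: keep only dots and breakers, normalizing every breaker to '|'.
--     reduced = ''.join('.' if c == '.' else '|'
--                       for c in text if c == '.' or c in BREAKERS)
--     # Stage 2: each '|'-separated segment contributes its dot count // 3.
--     return sum(len(seg) // 3 for seg in reduced.split('|'))
-- ===== Notes on version B (the rewrite author's own statement) =====
-- stated objective: simpler
-- what changed: Replaces A's single stateful scan (per-dot reach-3-then-reset trigger with four if/continue branches) by three staged passes: filter the text down to dots and breakers with every breaker normalized to one fixed separator character, split on that separator, and sum len(segment)//3 over the segments.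
import Mathlib
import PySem

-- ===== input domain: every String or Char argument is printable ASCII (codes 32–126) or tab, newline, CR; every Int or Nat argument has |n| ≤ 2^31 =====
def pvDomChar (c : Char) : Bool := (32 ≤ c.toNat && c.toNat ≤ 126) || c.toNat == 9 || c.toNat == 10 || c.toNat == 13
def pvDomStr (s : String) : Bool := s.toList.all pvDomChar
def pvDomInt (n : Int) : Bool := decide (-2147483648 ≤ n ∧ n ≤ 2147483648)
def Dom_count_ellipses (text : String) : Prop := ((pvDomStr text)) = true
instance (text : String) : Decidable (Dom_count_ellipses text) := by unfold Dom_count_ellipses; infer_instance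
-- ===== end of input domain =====

-- B replaces A's stateful per-character trigger loop with three staged passes
-- (filter/normalize to dots-and-separators, split on the separator, sum len//3
-- per segment); objective: simpler decomposition, same cost.

-- ===== PORT A =====
def pvLettersA : List Char := "abcdefghijklmnopqrstuvwxyzABDCEFGHIJKLMNOPQRSTUVWXYZ".toList
def pvDigitsA : List Char := "123456789".toList
def pvPunctA : List Char := "?!,;:'-[]}{()\"*/".toList

def pvStepA (s : Int × Int) (i : Char) : Int × Int :=
  let count := if i == '.' then s.2 + 1 else s.2
  if i == ' ' then (s.1, count)
  else
    let s2 := if count ≥ 3 then (s.1 + 1, (0 : Int)) else (s.1, count)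
    if pvLettersA.contains i then (s2.1, 0)
    else if pvDigitsA.contains i then (s2.1, 0)
    else if pvPunctA.contains i then (s2.1, 0)
    else s2

def count_ellipses (text : String) : Int :=
  (text.toList.foldl pvStepA (0, 0)).1

-- ===== PORT B =====
def pvBreakersB : List Char :=
  ("abcdefghijklmnopqrstuvwxyzABDCEFGHIJKLMNOPQRSTUVWXYZ" ++ "123456789" ++ "?!,;:'-[]}{()\"*/").toList

-- Stage 1 of Source B: keep only dots and breakers, normalizing every breaker to '|'.
def pvReduce (l : List Char) : List Char :=
  l.filterMap (fun c =>
    if c == '.' then some '.'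
    else if pvBreakersB.contains c then some '|'
    else none)

-- Stage 2 of Source B: split on '|' and sum len(seg) // 3 over the segments.
def count_ellipses_alt (text : String) : Int :=
  (((pvReduce text.toList).splitOn '|').map
    (fun seg => PySem.Int.floordiv (Int.ofNat seg.length) 3)).sum

-- ===== PRECONDITION & SPEC =====
def Spec_count_ellipses (text : String) (out : Int) : Prop := out = count_ellipses_alt text
instance (text : String) (out : Int) : Decidable (Spec_count_ellipses text out) := by unfold Spec_count_ellipses; infer_instance

-- ===== CLAIM (what is proved, stated in full; the proofs are below) =====
def Claim_equal_count_ellipses : Prop := ∀ (text : String), Dom_count_ellipses text → Spec_count_ellipses text (count_ellipses text)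

-- ===== LEMMAS AND PROOFS =====

-- segment sum of an already-reduced character list
def pvSsum (l : List Char) : Int :=
  ((l.splitOn '|').map (fun seg => (Int.ofNat seg.length) / 3)).sum

lemma pv_alt_eq (text : String) :
    count_ellipses_alt text = pvSsum (pvReduce text.toList) := by
  simp [count_ellipses_alt, pvSsum]

lemma pv_Ssum_single (n : Nat) : pvSsum (List.replicate n '.') = (n : Int) / 3 := by
  unfold pvSsum
  rw [List.splitOn, List.splitOnP_eq_single]
  · simp
  · intro x hx
    simp [List.eq_of_mem_replicate hx]

lemma pv_Ssum_break (n : Nat) (xs : List Char) :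
    pvSsum (List.replicate n '.' ++ '|' :: xs) = (n : Int) / 3 + pvSsum xs := by
  unfold pvSsum
  rw [List.splitOn, List.splitOnP_first _ _ (fun x hx => by simp [List.eq_of_mem_replicate hx]) '|' (by simp)]
  simp [List.splitOn]

lemma pv_breakers_split : pvBreakersB = pvLettersA ++ pvDigitsA ++ pvPunctA := by decide

lemma pv_inv (l : List Char) (e t d : Int) (hd : 0 ≤ d) (he : e = t + d / 3) :
    (l.foldl pvStepA (e, d % 3)).1
      = t + pvSsum (List.replicate d.toNat '.' ++ pvReduce l) := by
  induction l generalizing e t d with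
  | nil =>
      simp only [List.foldl_nil, pvReduce, List.filterMap_nil, List.append_nil,
        pv_Ssum_single]
      rw [Int.toNat_of_nonneg hd]
      omega
  | cons ch rest ih =>
      have hlt : ¬ d % 3 ≥ 3 := by omega
      simp only [List.foldl_cons]
      by_cases hbr : ch ∈ pvBreakersB
      · -- breaker: resets A's counter; in B, contributes a '|' separator
        have hmem : ch ∈ pvLettersA ∨ ch ∈ pvDigitsA ∨ ch ∈ pvPunctA := by
          rw [pv_breakers_split] at hbr
          simpa [List.mem_append] using hbr
        have hdot : ch ≠ '.' := by rintro rfl; exact absurd hbr (by decide)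
        have hsp : ch ≠ ' ' := by rintro rfl; exact absurd hbr (by decide)
        have hA : pvStepA (e, d % 3) ch = (e, 0) := by
          rcases hmem with h | h | h <;> simp [pvStepA, hdot, hsp, hlt, h]
        have hR : pvReduce (ch :: rest) = '|' :: pvReduce rest := by
          simp [pvReduce, hdot, hbr]
        rw [hA, hR, pv_Ssum_break]
        have := ih e e 0 le_rfl (by omega)
        simp only [Int.toNat_zero, List.replicate_zero, List.nil_append] at this
        rw [show (0 : Int) % 3 = 0 by norm_num] at this
        rw [this, Int.toNat_of_nonneg hd]
        omega
      · by_cases hdot : ch = '.'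
        · subst hdot
          have hR : pvReduce ('.' :: rest) = '.' :: pvReduce rest := by
            simp [pvReduce]
          have hrep : List.replicate d.toNat '.' ++ '.' :: pvReduce rest
              = List.replicate (d + 1).toNat '.' ++ pvReduce rest := by
            rw [show (d + 1).toNat = d.toNat + 1 by omega, List.replicate_succ']
            simp
          by_cases h2 : d % 3 = 2
          · have hA : pvStepA (e, d % 3) '.' = (e + 1, 0) := by
              rw [h2]
              simp [pvStepA, pvLettersA, pvDigitsA, pvPunctA]
            rw [hA, hR, hrep]
            have := ih (e + 1) t (d + 1) (by omega) (by omega)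
            rw [show (d + 1) % 3 = 0 by omega] at this
            exact this
          · have hc3 : ¬ d % 3 + 1 ≥ 3 := by omega
            have hA : pvStepA (e, d % 3) '.' = (e, d % 3 + 1) := by
              simp [pvStepA, pvLettersA, pvDigitsA, pvPunctA, hc3]
            rw [hA, hR, hrep]
            have := ih e t (d + 1) (by omega) (by omega)
            rw [show (d + 1) % 3 = d % 3 + 1 by omega] at this
            exact this
        · -- transparent character: A's state unchanged, dropped by B's filter
          have hR : pvReduce (ch :: rest) = pvReduce rest := by
            simp [pvReduce, hdot, hbr]
          have hn : ch ∉ pvLettersA ∧ ch ∉ pvDigitsA ∧ ch ∉ pvPunctA := by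
            rw [pv_breakers_split] at hbr
            simp [List.mem_append] at hbr
            tauto
          have hA : pvStepA (e, d % 3) ch = (e, d % 3) := by
            by_cases hsp : ch = ' '
            · subst hsp; simp [pvStepA]
            · simp [pvStepA, hdot, hsp, hlt, hn.1, hn.2.1, hn.2.2]
          rw [hA, hR]
          exact ih e t d hd he

-- ===== VERDICT (by name: the statement is the Claim_ definition above) =====
theorem count_ellipses_spec : Claim_equal_count_ellipses := by
  intro text _
  unfold Spec_count_ellipses count_ellipses
  rw [pv_alt_eq]
  have := pv_inv text.toList 0 0 0 le_rfl (by norm_num)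
  simpa using this
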